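-- pv_equiv track=rewrite | github.com/Navron4500/CoursesLearning | Coding Ninjas/1. Recursion/recursion_3_checkAB.py | checkAB
-- ===== SOURCE A (Python) =====
-- def checkAB(s,si=0):
--     if si >=  len(s)-1:
--         return True
--
--     if s[0] != 'a':
--         return False
--
--     if s[si] == 'a': #and (s[si+1] == 'a' or (s[si+1] == 'b' and s[si+2] == 'b')):
--         if s[si+1] == "a":
--             res = checkAB(s,si+1)
--             if res:
--                 return True
--             return False
--
--         elif s[si+1:si+3] == 'bb':
--             res = checkAB(s,si+2)
--             if res:
--                 return True
--             return False
--
--         """if res: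
--             return True
--         return False"""
--
--     if s[si] == 'b': #and s[si+1] == 'a':
--         if s[si+1] == 'a':
--             res = checkAB(s,si+1)
--             if res:
--                 return True
--             return False
--
--     return False
-- ===== SOURCE B (Python) =====
-- def checkAB(s, si=0):
--     # Iterative rewrite: one while-loop maintaining the index si, flat guard chain.
--     while True:
--         if si >= len(s) - 1:
--             return True
--         if s[0] != 'a':
--             return False
--         if s[si] == 'a' and s[si+1] == 'a':
--             si += 1
--         elif s[si] == 'a' and s[si+1:si+3] == 'bb':
--             si += 2
--         elif s[si] == 'b' and s[si+1] == 'a':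
--             si += 1
--         else:
--             return False
-- ===== Notes on version B (the rewrite author's own statement) =====
-- stated objective: simpler
-- what changed: The tail recursion, which stores each recursive result in a temporary and then maps it through an if-True-else-False step, is replaced by a single iterative while-loop that advances the index si through a flat elif guard chain, with no recursion and no intermediate result variable.
import Mathlib
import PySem

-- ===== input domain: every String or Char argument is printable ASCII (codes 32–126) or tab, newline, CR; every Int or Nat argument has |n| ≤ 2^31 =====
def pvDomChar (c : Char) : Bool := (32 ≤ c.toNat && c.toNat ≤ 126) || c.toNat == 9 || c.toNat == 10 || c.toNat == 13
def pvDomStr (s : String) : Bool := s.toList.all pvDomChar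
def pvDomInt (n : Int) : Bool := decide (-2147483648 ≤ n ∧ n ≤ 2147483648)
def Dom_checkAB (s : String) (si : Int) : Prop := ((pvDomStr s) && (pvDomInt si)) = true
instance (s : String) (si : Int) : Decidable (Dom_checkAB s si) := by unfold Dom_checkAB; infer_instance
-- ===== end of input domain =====

-- B replaces A's recursion (with its 'res = …; if res: return True; return False' pattern) by a
-- single iterative loop over the index si; return values are proved equal on Pre_checkAB.

-- ===== PORT A =====
-- literal transliteration of the recursive A; the Nat fuel only makes the recursion structural
-- (fuel = (len(s)-1-si).toNat is 0 exactly when the base case 'si >= len(s)-1' fires, and each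
-- recursive call lowers it by at least 1, so the fuel branch never changes the computed value).
-- Where Python would raise IndexError the PySem getters return none and the port returns false;
-- those inputs are outside Pre_checkAB.
def checkABGo (s : String) : Nat → Int → Bool
  | 0, _ => true                                  -- only reachable when si ≥ len(s)-1: Python's base case
  | f + 1, si =>
    if si ≥ PySem.Str.len s - 1 then true
    else if PySem.Str.pyGet? s 0 ≠ some 'a' then false
    else
      match PySem.Str.pyGet? s si with
      | none => false          -- s[si] raises here; excluded by Pre_checkAB
      | some c =>
        if c = 'a' then
          match PySem.Str.pyGet? s (si + 1) with
          | none => false      -- s[si+1] raises here; excluded by Pre_checkAB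
          | some c1 =>
            if c1 = 'a' then
              let res := checkABGo s f (si + 1)
              if res then true else false
            else if PySem.Str.slice s (some (si + 1)) (some (si + 3)) = "bb" then
              let res := checkABGo s f (si + 2)
              if res then true else false
            else false         -- falls through to the s[si]=='b' test, which is false since c='a'
        else if c = 'b' then
          match PySem.Str.pyGet? s (si + 1) with
          | none => false      -- s[si+1] raises here; excluded by Pre_checkAB
          | some c1 =>
            if c1 = 'a' then
              let res := checkABGo s f (si + 1)
              if res then true else false
            else false
        else false

def checkAB (s : String) (si : Int) : Bool :=
  checkABGo s (PySem.Str.len s - 1 - si).toNat si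

-- ===== PORT B =====
-- transliteration of Source B's while-loop: the loop body is one flat guard chain and each
-- 'continue' is a tail call with the advanced index; same structural fuel as above.
def checkABAltGo (s : String) : Nat → Int → Bool
  | 0, _ => true                                  -- only reachable when si ≥ len(s)-1: the loop's first exit
  | f + 1, si =>
    if si ≥ PySem.Str.len s - 1 then true
    else if (PySem.Str.pyGet? s 0).getD ' ' ≠ 'a' then false
    else if (PySem.Str.pyGet? s si).getD ' ' = 'a' ∧ (PySem.Str.pyGet? s (si + 1)).getD ' ' = 'a' then
      checkABAltGo s f (si + 1)
    else if (PySem.Str.pyGet? s si).getD ' ' = 'a' ∧ PySem.Str.slice s (some (si + 1)) (some (si + 3)) = "bb" then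
      checkABAltGo s f (si + 2)
    else if (PySem.Str.pyGet? s si).getD ' ' = 'b' ∧ (PySem.Str.pyGet? s (si + 1)).getD ' ' = 'a' then
      checkABAltGo s f (si + 1)
    else false

def checkAB_alt (s : String) (si : Int) : Bool :=
  checkABAltGo s (PySem.Str.len s - 1 - si).toNat si

-- ===== PRECONDITION & SPEC =====
-- Pre_ excludes exactly the inputs where Python A raises IndexError: calls that reach s[0] on an
-- empty string or s[si] with si below -len(s) (reachable only when s starts with 'a').
def Pre_checkAB (s : String) (si : Int) : Prop :=
  si ≥ PySem.Str.len s - 1 ∨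
    (s.toList ≠ [] ∧ (s.toList.head? ≠ some 'a' ∨ si ≥ -(PySem.Str.len s)))
instance (s : String) (si : Int) : Decidable (Pre_checkAB s si) := by unfold Pre_checkAB; infer_instance

def pvWitness_checkAB : String × Int := ("aabb", 0)

def Spec_checkAB (s : String) (si : Int) (out : Bool) : Prop := out = checkAB_alt s si
instance (s : String) (si : Int) (out : Bool) : Decidable (Spec_checkAB s si out) := by unfold Spec_checkAB; infer_instance

-- ===== CLAIM (what is proved, stated in full; the proofs are below) =====
def Claim_equal_checkAB : Prop := ∀ (s : String) (si : Int), Dom_checkAB s si → Pre_checkAB s si → Spec_checkAB s si (checkAB s si)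

-- ===== LEMMAS AND PROOFS =====

lemma checkABGo_eq_altGo (s : String) :
    ∀ (f : Nat) (si : Int), Pre_checkAB s si → checkABGo s f si = checkABAltGo s f si := by
  intro f
  induction f with
  | zero => intro si _; rfl
  | succ f ih =>
    intro si hpre
    rw [checkABGo, checkABAltGo]
    by_cases hbase : si ≥ PySem.Str.len s - 1
    · rw [if_pos hbase, if_pos hbase]
    · simp only [if_neg hbase]
      have hsl : s.length = s.toList.length := by simp
      simp only [PySem.Str.len_eq] at hbase
      have hlen : 0 < s.toList.length := by
        rcases hpre with h | ⟨hne, _⟩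
        · simp only [PySem.Str.len_eq] at h; omega
        · exact List.length_pos_iff.mpr hne
      obtain ⟨h0, hh0⟩ : ∃ c, PySem.Str.pyGet? s 0 = some c := by
        rcases h : PySem.Str.pyGet? s (0 : Int) with _ | c
        · exfalso
          simp only [PySem.Str.pyGet?_eq, PySem.Chars.pyGet?_eq_listPyGet?,
            PySem.List.pyGet?_eq_none_iff, PySem.Raise.InRange] at h
          omega
        · exact ⟨c, rfl⟩
      have hh0' : s.toList[(0 : Nat)]? = some h0 := by
        have := hh0
        simp only [PySem.Str.pyGet?_eq, PySem.Chars.pyGet?_eq_listPyGet?,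
          PySem.List.pyGet?_zero] at this
        exact this
      have hhead : s.toList.head? = some h0 := by
        rwa [List.head?_eq_getElem?]
      rw [hh0]
      simp only [Option.getD_some]
      by_cases ha0 : h0 = 'a'
      · subst ha0
        rw [if_neg (show ¬ ((some 'a' : Option Char) ≠ some 'a') from by simp),
          if_neg (show ¬ (('a' : Char) ≠ 'a') from by simp)]
        -- Pre gives si ≥ -len(s)
        have hsi : si ≥ -(s.toList.length : Int) := by
          rcases hpre with h | ⟨_, h | h⟩
          · simp only [PySem.Str.len_eq] at h; omega
          · exact absurd hhead (by simp [h])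
          · simp only [PySem.Str.len_eq] at h; omega
        -- s[si] and s[si+1] are in range
        obtain ⟨c, hc⟩ : ∃ c, PySem.Str.pyGet? s si = some c := by
          rcases h : PySem.Str.pyGet? s si with _ | c
          · exfalso
            simp only [PySem.Str.pyGet?_eq, PySem.Chars.pyGet?_eq_listPyGet?,
              PySem.List.pyGet?_eq_none_iff, PySem.Raise.InRange] at h
            omega
          · exact ⟨c, rfl⟩
        obtain ⟨c1, hc1⟩ : ∃ c1, PySem.Str.pyGet? s (si + 1) = some c1 := by
          rcases h : PySem.Str.pyGet? s (si + 1) with _ | c1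
          · exfalso
            simp only [PySem.Str.pyGet?_eq, PySem.Chars.pyGet?_eq_listPyGet?,
              PySem.List.pyGet?_eq_none_iff, PySem.Raise.InRange] at h
            omega
          · exact ⟨c1, rfl⟩
        rw [hc, hc1]
        simp only [Option.getD_some]
        have hpre' : ∀ k : Int, 0 ≤ k → Pre_checkAB s (si + k) := by
          intro k hk
          right
          exact ⟨List.length_pos_iff.mp hlen,
            Or.inr (by simp only [PySem.Str.len_eq]; omega)⟩
        have e1 : checkABGo s f (si + 1) = checkABAltGo s f (si + 1) :=
          ih (si + 1) (hpre' 1 (by omega))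
        have e2 : checkABGo s f (si + 2) = checkABAltGo s f (si + 2) :=
          ih (si + 2) (hpre' 2 (by omega))
        rw [e1, e2]
        by_cases hca : c = 'a' <;> by_cases hc1a : c1 = 'a' <;>
          by_cases hbb : PySem.Str.slice s (some (si + 1)) (some (si + 3)) = "bb" <;>
          by_cases hcb : c = 'b' <;>
          simp [hca, hc1a, hbb, hcb]
      · -- s[0] ≠ 'a': both return false
        rw [if_pos (show (some h0 : Option Char) ≠ some 'a' from by simpa using ha0),
          if_pos (show h0 ≠ 'a' from ha0)]

-- ===== VERDICT (by name: the statement is the Claim_ definition above) =====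
theorem checkAB_spec : Claim_equal_checkAB := by
  intro s si _ hpre
  unfold Spec_checkAB checkAB checkAB_alt
  exact checkABGo_eq_altGo s (PySem.Str.len s - 1 - si).toNat si hpre
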